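-- pv_equiv track=rewrite | github.com/blacix/ticket-enhancer | jira_issue_enhancer.py | _extract_description_from_output
-- ===== SOURCE A (Python) =====
-- def _extract_description_from_output(llama_output: str) -> str:
--     """Extract just the enhanced description from Llama's output"""
--     lines = llama_output.split('\n')
--     description_lines = []
--     in_description = False
--
--     for line in lines:
--         if 'ENHANCED DESCRIPTION:' in line.upper():
--             in_description = True
--             # Include any text after the header on the same line
--             after_header = line.split(':', 1)
--             if len(after_header) > 1 and after_header[1].strip():
--                 description_lines.append(after_header[1].strip())
--         elif in_description:
--             # Stop if we hit another section header
--             if line.strip().isupper() and ':' in line and len(line.strip()) < 50: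
--                 break
--             description_lines.append(line)
--
--     return '\n'.join(description_lines).strip()
-- ===== SOURCE B (Python) =====
-- def _extract_description_from_output(llama_output: str) -> str:
--     """Declarative version: compute boundary indices with comprehensions, then
--     slice out the section and render it with a map/filter pipeline."""
--     lines = llama_output.split('\n')
--
--     def is_header(l):
--         return 'ENHANCED DESCRIPTION:' in l.upper()
--
--     def is_stop(l):
--         s = l.strip()
--         return s.isupper() and ':' in l and len(s) < 50
--
--     def piece(l):
--         # what a line contributes to the section, or None for nothing
--         if is_header(l):
--             t = l.split(':', 1)[1].strip()
--             return t or None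
--         return l
--
--     starts = [k for k, l in enumerate(lines) if is_header(l)]
--     if not starts:
--         return ''
--     tail = lines[starts[0]:]
--     stops = [k for k, l in enumerate(tail) if not is_header(l) and is_stop(l)]
--     seg = tail[:stops[0]] if stops else tail
--     return '\n'.join(p for p in map(piece, seg) if p is not None).strip()
-- ===== Notes on version B (the rewrite author's own statement) =====
-- stated objective: alternative
-- what changed: Replaced A's stateful single pass (in_description flag, break) by a declarative pipeline: enumerate-comprehensions compute the header start index and the stop index, then the section is a slice of the line list rendered by a map/filter over an Optional-valued piece function.
import Mathlib
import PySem

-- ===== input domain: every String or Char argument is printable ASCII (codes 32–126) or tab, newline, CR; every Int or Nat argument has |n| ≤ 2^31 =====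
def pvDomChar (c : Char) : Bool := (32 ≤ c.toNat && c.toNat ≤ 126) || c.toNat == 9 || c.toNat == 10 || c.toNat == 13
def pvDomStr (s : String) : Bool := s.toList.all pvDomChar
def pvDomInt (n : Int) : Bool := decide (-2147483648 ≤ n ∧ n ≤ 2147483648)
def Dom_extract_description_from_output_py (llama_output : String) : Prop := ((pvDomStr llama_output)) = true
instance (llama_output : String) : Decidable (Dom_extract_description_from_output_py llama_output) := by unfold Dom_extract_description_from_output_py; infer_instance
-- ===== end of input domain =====

-- B replaces A's stateful loop (flag + break) by a declarative pipeline: boundary indices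
-- computed by enumerate-comprehensions, a slice, and a map/filter rendering; objective: alternative.

-- str.isupper, hand-ported (PySem has no string-level isupper): at least one cased (letter)
-- character and no lowercase one — exact on the ASCII domain, where cased = alphabetic.
def pyStrIsupper (s : String) : Bool :=
  s.toList.any (fun c => PySem.Chars.isupper c) && s.toList.all (fun c => !PySem.Chars.islower c)

-- ===== PORT A =====
-- A's single for-loop with the in_description flag; the `break` makes it a structural recursion.
def loopA : List String → Bool → List String → List String
  | [], _, acc => acc
  | line :: rest, inD, acc =>
    if PySem.Str.isIn "ENHANCED DESCRIPTION:" (PySem.Str.upper line) then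
      -- after_header = line.split(':', 1); append after_header[1].strip() if present and truthy
      match PySem.List.pyGet? ((PySem.Str.splitMax? line ":" 1).getD []) 1 with
      | some x =>
        if PySem.Str.strip x = "" then loopA rest true acc
        else loopA rest true (acc ++ [PySem.Str.strip x])
      | none => loopA rest true acc
    else if inD then
      if pyStrIsupper (PySem.Str.strip line) && PySem.Str.isIn ":" line
          && decide (PySem.Str.len (PySem.Str.strip line) < 50) then acc  -- break
      else loopA rest true (acc ++ [line])
    else loopA rest false acc

def extract_description_from_output_py (llama_output : String) : String :=
  PySem.Str.strip (PySem.Str.join "\n"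
    (loopA ((PySem.Str.split? llama_output "\n").getD []) false []))

-- ===== PORT B =====
-- Source B's is_header / is_stop / piece helpers
def isHeaderB (l : String) : Bool := PySem.Str.isIn "ENHANCED DESCRIPTION:" (PySem.Str.upper l)

def isStopB (l : String) : Bool :=
  pyStrIsupper (PySem.Str.strip l) && PySem.Str.isIn ":" l
    && decide (PySem.Str.len (PySem.Str.strip l) < 50)

def pieceB (l : String) : Option String :=
  if isHeaderB l then
    -- l.split(':', 1)[1].strip(); the [1] never fails on a header line (it contains ':')
    match PySem.List.pyGet? ((PySem.Str.splitMax? l ":" 1).getD []) 1 with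
    | some x => if PySem.Str.strip x = "" then none else some (PySem.Str.strip x)
    | none => none
  else some l

-- [k for k, l in enumerate(lines) if p(l)]
def idxWhere (p : String → Bool) (ls : List String) : List Int :=
  (PySem.List.enumerate ls).filterMap (fun kl => if p kl.2 then some kl.1 else none)

def extract_description_from_output_py_alt (llama_output : String) : String :=
  let lines := (PySem.Str.split? llama_output "\n").getD []
  match idxWhere isHeaderB lines with
  | [] => ""
  | i :: _ =>
    let tail := PySem.List.slice lines (some i) none      -- lines[starts[0]:]
    let seg :=
      match idxWhere (fun l => !isHeaderB l && isStopB l) tail with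
      | j :: _ => PySem.List.slice tail none (some j)     -- tail[:stops[0]]
      | [] => tail
    PySem.Str.strip (PySem.Str.join "\n" ((seg.map pieceB).filterMap id))

-- ===== PRECONDITION & SPEC =====
def Spec_extract_description_from_output_py (llama_output : String) (out : String) : Prop := out = extract_description_from_output_py_alt llama_output
instance (llama_output : String) (out : String) : Decidable (Spec_extract_description_from_output_py llama_output out) := by unfold Spec_extract_description_from_output_py; infer_instance

-- ===== CLAIM (what is proved, stated in full; the proofs are below) =====
def Claim_equal_extract_description_from_output_py : Prop := ∀ (llama_output : String), Dom_extract_description_from_output_py llama_output → Spec_extract_description_from_output_py llama_output (extract_description_from_output_py llama_output)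

-- ===== LEMMAS AND PROOFS =====

-- a line is kept (does not terminate the section) iff it is a header line or not a stop line
def keepB (l : String) : Bool := isHeaderB l || !isStopB l

-- idxWhere with an explicit enumerate offset
def idxAux (p : String → Bool) (ls : List String) (s : Int) : List Int :=
  (PySem.List.enumerate ls s).filterMap (fun kl => if p kl.2 then some kl.1 else none)

theorem idxAux_cons (p : String → Bool) (l : String) (ls : List String) (s : Int) :
    idxAux p (l :: ls) s = if p l then s :: idxAux p ls (s + 1) else idxAux p ls (s + 1) := by
  by_cases h : p l = true
  · simp [idxAux, PySem.List.enumerate_cons, h]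
  · simp [idxAux, PySem.List.enumerate_cons, h]

theorem idxAux_shift (p : String → Bool) (ls : List String) :
    ∀ s : Int, idxAux p ls (s + 1) = (idxAux p ls s).map (· + 1) := by
  induction ls with
  | nil => intro s; rfl
  | cons l ls ih =>
    intro s
    rw [idxAux_cons, idxAux_cons]
    by_cases h : p l = true
    · simp [h, ih]
    · simp only [Bool.not_eq_true] at h
      simp [h, ih]

theorem mem_idxAux_le (p : String → Bool) (ls : List String) :
    ∀ s i, i ∈ idxAux p ls s → s ≤ i := by
  induction ls with
  | nil => intro s i h; simp [idxAux, PySem.List.enumerate_nil] at h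
  | cons l ls ih =>
    intro s i h
    rw [idxAux_cons] at h
    by_cases hp : p l = true
    · rw [if_pos hp] at h
      rcases List.mem_cons.mp h with rfl | h'
      · exact le_refl _
      · have := ih (s + 1) i h'; omega
    · rw [if_neg hp] at h
      have := ih (s + 1) i h; omega

theorem idxWhere_cons (p : String → Bool) (l : String) (ls : List String) :
    idxWhere p (l :: ls) =
      if p l then (0 : Int) :: (idxWhere p ls).map (· + 1) else (idxWhere p ls).map (· + 1) := by
  show idxAux p (l :: ls) 0 = _
  rw [idxAux_cons, show (0 : Int) + 1 = 0 + 1 from rfl, idxAux_shift]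
  rfl

theorem mem_idxWhere_nonneg (p : String → Bool) (ls : List String) (i : Int)
    (h : i ∈ idxWhere p ls) : 0 ≤ i :=
  mem_idxAux_le p ls 0 i h

-- the seg computation of B equals takeWhile keepB
theorem seg_eq_takeWhile (ls : List String) :
    (match idxWhere (fun l => !isHeaderB l && isStopB l) ls with
      | j :: _ => PySem.List.slice ls none (some j)
      | [] => ls) = ls.takeWhile keepB := by
  induction ls with
  | nil => rfl
  | cons l ls ih =>
    rw [idxWhere_cons]
    by_cases hk : keepB l = true
    · have hnk : (!isHeaderB l && isStopB l) = false := by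
        unfold keepB at hk
        cases h1 : isHeaderB l <;> cases h2 : isStopB l <;> simp_all
      rw [if_neg (by simp [hnk]), List.takeWhile_cons_of_pos hk]
      cases hidx : idxWhere (fun l => !isHeaderB l && isStopB l) ls with
      | nil =>
        rw [hidx] at ih
        rw [List.map_nil]
        show l :: ls = _
        exact congrArg (l :: ·) ih
      | cons j t =>
        have hj : 0 ≤ j := mem_idxWhere_nonneg _ ls j (by rw [hidx]; exact List.mem_cons_self ..)
        rw [hidx] at ih
        rw [List.map_cons]
        show PySem.List.slice (l :: ls) none (some (j + 1)) = _
        have ih' : PySem.List.slice ls none (some j) = List.takeWhile keepB ls := ih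
        rw [PySem.List.slice_to _ hj] at ih'
        rw [PySem.List.slice_to _ (by omega : (0:Int) ≤ j + 1),
          show (j + 1).toNat = j.toNat + 1 by omega, List.take_succ_cons, ih']
    · have hnk : (!isHeaderB l && isStopB l) = true := by
        unfold keepB at hk
        cases h1 : isHeaderB l <;> cases h2 : isStopB l <;> simp_all
      rw [if_pos (by simp [hnk])]
      show PySem.List.slice (l :: ls) none (some 0) = _
      rw [PySem.List.slice_to _ (le_refl 0),
        List.takeWhile_cons_of_neg (by simp only [Bool.not_eq_true] at hk; simp [hk])]
      rfl

-- once the flag is set, A collects exactly the kept prefix, rendered by pieceB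
theorem loopA_true_eq (ls : List String) :
    ∀ acc, loopA ls true acc = acc ++ (ls.takeWhile keepB).filterMap pieceB := by
  induction ls with
  | nil => intro acc; simp [loopA]
  | cons line ls ih =>
    intro acc
    have hstep : loopA (line :: ls) true acc =
        (if isHeaderB line then
          match PySem.List.pyGet? ((PySem.Str.splitMax? line ":" 1).getD []) 1 with
          | some x => if PySem.Str.strip x = "" then loopA ls true acc
                      else loopA ls true (acc ++ [PySem.Str.strip x])
          | none => loopA ls true acc
        else if isStopB line then acc
        else loopA ls true (acc ++ [line])) := by rw [loopA]; rfl
    rw [hstep]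
    by_cases hh : isHeaderB line = true
    · rw [if_pos hh, List.takeWhile_cons_of_pos (show keepB line = true by simp [keepB, hh])]
      cases hm : PySem.List.pyGet? ((PySem.Str.splitMax? line ":" 1).getD []) 1 with
      | none =>
        have hp : pieceB line = none := by simp [pieceB, hh, hm]
        simp [ih, hp]
      | some x =>
        by_cases hx : PySem.Str.strip x = ""
        · have hp : pieceB line = none := by simp [pieceB, hh, hm, hx]
          simp [hx, ih, hp]
        · have hp : pieceB line = some (PySem.Str.strip x) := by simp [pieceB, hh, hm, hx]
          simp [hx, ih, hp]
    · rw [if_neg hh]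
      by_cases hs : isStopB line = true
      · rw [if_pos hs,
          List.takeWhile_cons_of_neg (by simp only [Bool.not_eq_true] at hh; simp [keepB, hh, hs])]
        simp
      · rw [if_neg hs, List.takeWhile_cons_of_pos (by simp [keepB, hs]), ih]
        have hp : pieceB line = some line := by
          simp only [Bool.not_eq_true] at hh; simp [pieceB, hh]
        simp [hp]

-- B's body on a line list (proof helper: alt is this applied to the split lines)
def coreB (ls : List String) : String :=
  match idxWhere isHeaderB ls with
  | [] => ""
  | i :: _ =>
    let tail := PySem.List.slice ls (some i) none
    let seg :=
      match idxWhere (fun l => !isHeaderB l && isStopB l) tail with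
      | j :: _ => PySem.List.slice tail none (some j)
      | [] => tail
    PySem.Str.strip (PySem.Str.join "\n" ((seg.map pieceB).filterMap id))

theorem coreB_of_nil (ls : List String) (h : idxWhere isHeaderB ls = []) : coreB ls = "" := by
  unfold coreB; rw [h]

theorem coreB_of_idx (ls : List String) (i : Int) (rest : List Int)
    (h : idxWhere isHeaderB ls = i :: rest) :
    coreB ls = PySem.Str.strip (PySem.Str.join "\n"
      (((match idxWhere (fun l => !isHeaderB l && isStopB l)
            (PySem.List.slice ls (some i) none) with
          | j :: _ => PySem.List.slice (PySem.List.slice ls (some i) none) none (some j)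
          | [] => PySem.List.slice ls (some i) none).map pieceB).filterMap id)) := by
  unfold coreB; rw [h]

theorem core_eq (ls : List String) :
    PySem.Str.strip (PySem.Str.join "\n" (loopA ls false [])) = coreB ls := by
  induction ls with
  | nil => decide
  | cons l ls ih =>
    have hstep : loopA (l :: ls) false [] =
        (if isHeaderB l then
          match PySem.List.pyGet? ((PySem.Str.splitMax? l ":" 1).getD []) 1 with
          | some x => if PySem.Str.strip x = "" then loopA ls true []
                      else loopA ls true [PySem.Str.strip x]
          | none => loopA ls true []
        else loopA ls false []) := by rw [loopA]; rfl
    by_cases hh : isHeaderB l = true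
    · -- header found at index 0: tail is the whole list, seg is the kept prefix
      rw [coreB_of_idx (l :: ls) 0 _ (by rw [idxWhere_cons, if_pos hh])]
      have h0 : PySem.List.slice (l :: ls) (some (0 : Int)) none = l :: ls := by
        rw [PySem.List.slice_from _ (le_refl 0)]; rfl
      rw [h0, seg_eq_takeWhile]
      have hA : loopA (l :: ls) false [] =
          (List.takeWhile keepB (l :: ls)).filterMap pieceB := by
        rw [hstep, if_pos hh,
          List.takeWhile_cons_of_pos (show keepB l = true by simp [keepB, hh])]
        cases hm : PySem.List.pyGet? ((PySem.Str.splitMax? l ":" 1).getD []) 1 with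
        | none =>
          have hp : pieceB l = none := by simp [pieceB, hh, hm]
          simp [loopA_true_eq, hp]
        | some x =>
          by_cases hx : PySem.Str.strip x = ""
          · have hp : pieceB l = none := by simp [pieceB, hh, hm, hx]
            simp [hx, loopA_true_eq, hp]
          · have hp : pieceB l = some (PySem.Str.strip x) := by simp [pieceB, hh, hm, hx]
            simp [hx, loopA_true_eq, hp]
      have hmapid : ((List.takeWhile keepB (l :: ls)).map pieceB).filterMap id
          = (List.takeWhile keepB (l :: ls)).filterMap pieceB := by
        rw [List.filterMap_map]; rfl
      rw [hA, ← hmapid]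
    · -- not a header line: both sides reduce to the rest of the list
      have hA : loopA (l :: ls) false [] = loopA ls false [] := by
        rw [hstep, if_neg hh]
      rw [hA, ih]
      cases hidx : idxWhere isHeaderB ls with
      | nil =>
        rw [coreB_of_nil ls hidx, coreB_of_nil (l :: ls)
          (by rw [idxWhere_cons, if_neg (by simpa using hh), hidx, List.map_nil])]
      | cons i t =>
        have hi : 0 ≤ i := mem_idxWhere_nonneg _ ls i (by rw [hidx]; exact List.mem_cons_self ..)
        have hdrop : PySem.List.slice (l :: ls) (some (i + 1)) none =
            PySem.List.slice ls (some i) none := by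
          rw [PySem.List.slice_from _ (by omega : (0:Int) ≤ i + 1), PySem.List.slice_from _ hi,
            show (i + 1).toNat = i.toNat + 1 by omega, List.drop_succ_cons]
        rw [coreB_of_idx ls i t hidx, coreB_of_idx (l :: ls) (i + 1) (t.map (· + 1))
          (by rw [idxWhere_cons, if_neg (by simpa using hh), hidx, List.map_cons]), hdrop]

-- ===== VERDICT (by name: the statement is the Claim_ definition above) =====
theorem extract_description_from_output_py_spec : Claim_equal_extract_description_from_output_py := by
  intro llama_output _
  unfold Spec_extract_description_from_output_py
  unfold extract_description_from_output_py extract_description_from_output_py_alt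
  exact core_eq _
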